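-- pv_equiv track=rewrite | github.com/alex-and-ria/5 | spark_li.py | fmapper
-- ===== SOURCE A (Python) =====
-- def fmapper(pair):
-- 	f, text = pair
-- 	f = f[len(f)-5:]
-- 	offset=0
-- 	outstr=''
-- 	for lines in text.splitlines():
-- 		for word in lines.split():
-- 			outstr+=word+'\t'+f+'@'+str(offset)+'___'
-- 			offset+=len(word)+1 #1 for space character;
-- 	return outstr.split('___')
-- ===== SOURCE B (Python) =====
-- from itertools import accumulate
--
-- def fmapper(pair):
--     f, text = pair
--     tag = f[len(f)-5:]
--     words = [w for line in text.splitlines() for w in line.split()]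
--     offsets = accumulate((len(w) + 1 for w in words), initial=0)
--     return [f"{w}\t{tag}@{off}" for w, off in zip(words, offsets)] + ['']
-- ===== Notes on version B (the rewrite author's own statement) =====
-- stated objective: simpler
-- what changed: B gathers the words, computes their offsets as a prefix sum with itertools.accumulate, and formats each record directly into a list (appending the trailing '' once), instead of A's concatenating everything into one '___'-joined string and re-splitting it.
-- intended difference: When a word of text (equivalently, text itself) or the used 5-character tail of f contains the internal delimiter '___' (and text has at least one word), A's final split('___') cuts through the records it just built and returns mangled extra pieces, while B returns the intact 'word\tf5@offset' records, which is the intended output. — e.g. on fmapper("abcde", "a___b"): A returns ["a", "b\tabcde@0", ""], B returns ["a___b\tabcde@0", ""]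
import Mathlib
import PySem

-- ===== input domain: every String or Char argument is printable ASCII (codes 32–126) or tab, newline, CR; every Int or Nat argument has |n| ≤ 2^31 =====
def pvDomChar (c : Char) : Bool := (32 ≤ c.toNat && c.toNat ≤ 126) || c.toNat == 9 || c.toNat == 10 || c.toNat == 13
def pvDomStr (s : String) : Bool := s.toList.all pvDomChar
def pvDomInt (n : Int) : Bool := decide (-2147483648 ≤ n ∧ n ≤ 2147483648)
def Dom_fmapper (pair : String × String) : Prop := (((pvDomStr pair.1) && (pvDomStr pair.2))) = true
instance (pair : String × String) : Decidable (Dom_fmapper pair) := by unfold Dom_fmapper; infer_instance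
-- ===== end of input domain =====

-- ===== PORT A =====
-- B gathers the words and their offsets directly and formats each record,
-- instead of A's building one joined string and re-splitting it ('alternative', no speed claim).
-- A's Python: build 'word\tf5@offset___' into one string, return outstr.split('___').
def fmapperCoreA (f text : List Char) : List (List Char) :=
  let f5 := PySem.Chars.slice f (some ((f.length : Int) - 5)) none
  let st := (PySem.Chars.splitlines text).foldl
    (fun (st : Int × List Char) line =>
      (PySem.Chars.split₀ line).foldl
        (fun (st : Int × List Char) word =>
          (st.1 + (word.length : Int) + 1,
           st.2 ++ word ++ '\t' :: (f5 ++ '@' :: (PySem.Int.toChars st.1 ++ ['_', '_', '_'])))) st)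
    ((0 : Int), ([] : List Char))
  PySem.Chars.splitOn st.2 ['_', '_', '_']

def fmapper (pair : String × String) : List String :=
  (fmapperCoreA pair.1.toList pair.2.toList).map String.ofList

-- ===== PORT B =====
-- B's Python: words = [w for line in text.splitlines() for w in line.split()],
-- offsets = accumulate(len(w)+1, initial=0), records by zip, plus the trailing ''.
def fmapperCoreB (f text : List Char) : List (List Char) :=
  let tag := PySem.Chars.slice f (some ((f.length : Int) - 5)) none
  let words := (PySem.Chars.splitlines text).flatMap PySem.Chars.split₀
  let offsets := words.scanl (fun (a : Int) w => a + (w.length : Int) + 1) 0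
  (words.zip offsets).map (fun wo => wo.1 ++ '\t' :: (tag ++ '@' :: PySem.Int.toChars wo.2)) ++ [[]]

def fmapper_alt (pair : String × String) : List String :=
  (fmapperCoreB pair.1.toList pair.2.toList).map String.ofList

-- ===== PRECONDITION & SPEC =====
-- When a word of text (equivalently, text itself) or the used 5-char tail of f contains the
-- internal delimiter '___' (and text has a word at all), A's final split cuts through the
-- records it just built and returns mangled pieces; B returns the intact records, which is
-- the intended word/offset output.
def D_fmapper (pair : String × String) : Prop :=
  PySem.Str.isIn "___" pair.2 = true ∨
    (PySem.Str.isIn "___" (PySem.Str.slice pair.1 (some (PySem.Str.len pair.1 - 5)) none) = true ∧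
     pair.2.toList.any (fun c => !PySem.Chars.isspace c) = true)
instance (pair : String × String) : Decidable (D_fmapper pair) := by unfold D_fmapper; infer_instance

def Spec_fmapper (pair : String × String) (out : List String) : Prop := ¬ D_fmapper pair → out = fmapper_alt pair
instance (pair : String × String) (out : List String) : Decidable (Spec_fmapper pair out) := by unfold Spec_fmapper; infer_instance

def pvDiffWitness_fmapper : (String × String) := ("abcde", "a___b")
def pvDiffWitnessOut_fmapper : (List String) × (List String) :=
  (["a", "b\tabcde@0", ""], ["a___b\tabcde@0", ""])

-- ===== CLAIM (what is proved, stated in full; the proofs are below) =====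
def Claim_unchanged_fmapper : Prop := ∀ (pair : String × String), Dom_fmapper pair → Spec_fmapper pair (fmapper pair)
def Claim_changed_fmapper : Prop := Dom_fmapper (pvDiffWitness_fmapper) ∧ D_fmapper (pvDiffWitness_fmapper) ∧ fmapper (pvDiffWitness_fmapper) = pvDiffWitnessOut_fmapper.1 ∧ fmapper_alt (pvDiffWitness_fmapper) = pvDiffWitnessOut_fmapper.2 ∧ pvDiffWitnessOut_fmapper.1 ≠ pvDiffWitnessOut_fmapper.2

-- ===== LEMMAS AND PROOFS =====


-- the records both programs emit, one per word, threading the running offset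
def pvRecs (f5 : List Char) : List (List Char) → Int → List (List Char)
  | [], _ => []
  | w :: ws, off => (w ++ '\t' :: (f5 ++ '@' :: PySem.Int.toChars off)) :: pvRecs f5 ws (off + (w.length : Int) + 1)

-- a record is '___'-safe: no '___' inside it and it does not end in '_'
def pvGood (r : List Char) : Prop :=
  ¬ (['_', '_', '_'] <:+: r) ∧ ∃ d, r.getLast? = some d ∧ d ≠ '_'

theorem pv_triple_prefix_iff (v : List Char) :
    (['_', '_', '_'] <+: v) ↔ v[0]? = some '_' ∧ v[1]? = some '_' ∧ v[2]? = some '_' := by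
  constructor
  · rintro ⟨t, rfl⟩; simp
  · rintro ⟨h0, h1, h2⟩
    match v, h0, h1, h2 with
    | a :: b :: c :: rest, h0, h1, h2 =>
      simp only [List.getElem?_cons_zero, List.getElem?_cons_succ, Option.some.injEq] at h0 h1 h2
      subst h0; subst h1; subst h2; exact ⟨rest, rfl⟩

theorem pv_triple_infix_iff (u : List Char) :
    (['_', '_', '_'] <:+: u) ↔ ∃ i : Nat, u[i]? = some '_' ∧ u[i + 1]? = some '_' ∧ u[i + 2]? = some '_' := by
  constructor
  · rintro ⟨s, t, rfl⟩
    refine ⟨s.length, ?_, ?_, ?_⟩ <;> simp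
  · rintro ⟨i, h0, h1, h2⟩
    have h : ['_','_','_'] <+: u.drop i := by
      rw [pv_triple_prefix_iff]
      refine ⟨by simp [List.getElem?_drop, h0], ?_, ?_⟩ <;> simp only [List.getElem?_drop]
      · simpa [Nat.add_comm] using h1
      · simpa [Nat.add_comm] using h2
    exact h.isInfix.trans (u.drop_suffix i).isInfix

theorem pv_no_triple_append (a b : List Char) (c : Char) (hc : c ≠ '_')
    (ha : ¬ (['_', '_', '_'] <:+: a)) (hb : ¬ (['_', '_', '_'] <:+: b)) :
    ¬ (['_', '_', '_'] <:+: (a ++ c :: b)) := by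
  rw [pv_triple_infix_iff]
  rintro ⟨i, h0, h1, h2⟩
  have hlen : i + 2 < a.length + (b.length + 1) := by
    by_contra hge
    have : (a ++ c :: b)[i + 2]? = none := by
      rw [List.getElem?_eq_none]
      simp only [List.length_append, List.length_cons]
      omega
    simp [this] at h2
  rcases Nat.lt_or_ge (i + 2) a.length with h | h
  · -- triple inside a
    exact ha (pv_triple_infix_iff a |>.mpr ⟨i,
      by rw [← h0]; exact (List.getElem?_append_left (by omega)).symm,
      by rw [← h1]; exact (List.getElem?_append_left (by omega)).symm,
      by rw [← h2]; exact (List.getElem?_append_left (by omega)).symm⟩)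
  · rcases Nat.lt_or_ge a.length i with h' | h'
    · -- triple inside b : positions i = a.length + 1 + k
      obtain ⟨k, hk⟩ : ∃ k, i = a.length + 1 + k := ⟨i - (a.length + 1), by omega⟩
      subst hk
      refine hb (pv_triple_infix_iff b |>.mpr ⟨k, ?_, ?_, ?_⟩)
      · rw [← h0, List.getElem?_append_right (by omega)]
        simp only [List.getElem?_cons]
        rw [if_neg (by omega)]
        congr 1; omega
      · rw [← h1, List.getElem?_append_right (by omega)]
        simp only [List.getElem?_cons]
        rw [if_neg (by omega)]
        congr 1; omega
      · rw [← h2, List.getElem?_append_right (by omega)]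
        simp only [List.getElem?_cons]
        rw [if_neg (by omega)]
        congr 1; omega
    · -- a.length ∈ {i, i+1, i+2} : that position holds c ≠ '_'
      have hcpos : (a ++ c :: b)[a.length]? = some c := by
        rw [List.getElem?_append_right (le_refl _)]
        simp
      rcases (by omega : a.length = i ∨ a.length = i + 1 ∨ a.length = i + 2) with he | he | he
      · rw [he, h0] at hcpos; exact hc (Option.some.inj hcpos).symm
      · rw [he, h1] at hcpos; exact hc (Option.some.inj hcpos).symm
      · rw [he, h2] at hcpos; exact hc (Option.some.inj hcpos).symm

theorem pv_no_triple_of_no_underscore (u : List Char) (h : ∀ c ∈ u, c ≠ '_') :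
    ¬ (['_', '_', '_'] <:+: u) := by
  intro hinf
  exact h '_' (hinf.mem (by simp)) rfl



theorem pv_good_no_early (r t : List Char)
    (h : pvGood r) :
    ∀ j < r.length, ¬ (['_', '_', '_'] <+: ((r ++ t).drop j)) := by
  obtain ⟨hno, d, hd, hd'⟩ := h
  intro j hj hpre
  rw [List.drop_append_of_le_length (by omega)] at hpre
  have hm : (r.drop j).length = r.length - j := by simp
  rcases Nat.lt_or_ge (r.length - j) 3 with hlt | hge
  · -- the short tail of r is a prefix of '___', so r ends in '_'
    have hp1 : r.drop j <+: (r.drop j ++ t) := List.prefix_append _ _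
    have hp2 : r.drop j <+: (['_','_','_'] : List Char) :=
      List.prefix_of_prefix_length_le hp1 hpre (by simp; omega)
    have hidx : (r.drop j)[r.length - 1 - j]? = some d := by
      rw [List.getElem?_drop]
      rw [List.getLast?_eq_getElem?] at hd
      rw [← hd]; congr 1; omega
    have hmem : d ∈ r.drop j := List.mem_of_getElem? hidx
    have : d ∈ (['_','_','_'] : List Char) := hp2.mem hmem
    simp at this; exact hd' this
  · -- '___' fits inside r.drop j
    have : ['_','_','_'] <+: r.drop j := by
      have h3 : (['_','_','_'] : List Char) = (r.drop j ++ t).take 3 := by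
        obtain ⟨u, hu⟩ := hpre
        rw [← hu]; simp
      rw [List.take_append_of_le_length (by omega)] at h3
      exact h3 ▸ (r.drop j).take_prefix 3
    exact hno (this.isInfix.trans (r.drop_suffix j).isInfix)

theorem pv_digitChar_ne_underscore (k : Nat) : Nat.digitChar k ≠ '_' := by
  rcases Nat.lt_or_ge k 16 with h | h
  · revert h; revert k; decide
  · unfold Nat.digitChar
    rw [if_neg (by omega : ¬ k = 0), if_neg (by omega : ¬ k = 1), if_neg (by omega : ¬ k = 2), if_neg (by omega : ¬ k = 3), if_neg (by omega : ¬ k = 4), if_neg (by omega : ¬ k = 5), if_neg (by omega : ¬ k = 6), if_neg (by omega : ¬ k = 7), if_neg (by omega : ¬ k = 8), if_neg (by omega : ¬ k = 9), if_neg (by omega : ¬ k = 10), if_neg (by omega : ¬ k = 11), if_neg (by omega : ¬ k = 12), if_neg (by omega : ¬ k = 13), if_neg (by omega : ¬ k = 14), if_neg (by omega : ¬ k = 15)]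
    decide

theorem pv_toDigitsCore_shape (b : Nat) :
    ∀ (fuel n : Nat) (acc : List Char), ∃ l, Nat.toDigitsCore b fuel n acc = l ++ acc ∧
      (∀ c ∈ l, ∃ k, c = Nat.digitChar k) ∧ (fuel ≠ 0 → l ≠ []) := by
  intro fuel
  induction fuel with
  | zero => intro n acc; exact ⟨[], by simp [Nat.toDigitsCore], by simp, by simp⟩
  | succ f ih =>
    intro n acc
    rw [Nat.toDigitsCore]
    by_cases h : n / b = 0
    · simp only [h]
      exact ⟨[(n % b).digitChar], by simp, by simp, by simp⟩
    · simp only [if_neg h]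
      obtain ⟨l, hl, hall, _⟩ := ih (n / b) ((n % b).digitChar :: acc)
      refine ⟨l ++ [(n % b).digitChar], by simpa using hl, ?_, by simp⟩
      intro c hc
      rcases List.mem_append.mp hc with h' | h'
      · exact hall c h'
      · simp at h'; exact ⟨n % b, h'⟩

theorem pv_toChars_nonneg (o : Int) (ho : 0 ≤ o) :
    PySem.Int.toChars o ≠ [] ∧ ∀ c ∈ PySem.Int.toChars o, c ≠ '_' := by
  unfold PySem.Int.toChars
  rw [if_neg (by omega)]
  unfold Nat.toDigits
  obtain ⟨l, hl, hall, hne⟩ := pv_toDigitsCore_shape 10 (o.toNat + 1) o.toNat []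
  rw [hl]
  constructor
  · simp; exact hne (by omega)
  · intro c hc
    simp at hc
    obtain ⟨k, rfl⟩ := hall c hc
    exact pv_digitChar_ne_underscore k

theorem pv_split0_go_spec :
    ∀ (l cur : List Char) (acc : List (List Char)) (x : List Char),
      x ∈ PySem.Chars.split₀.go l cur acc → x ∈ acc ∨ x <:+: (cur.reverse ++ l) := by
  intro l cur acc
  induction l, cur, acc using PySem.Chars.split₀.go.induct with
  | case1 cur acc h =>
    intro x hx
    rw [PySem.Chars.split₀.go] at hx
    simp [h] at hx
    exact Or.inl hx
  | case2 cur acc h =>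
    intro x hx
    rw [PySem.Chars.split₀.go] at hx
    simp [h] at hx
    rcases hx with hx | rfl
    · exact Or.inl hx
    · exact Or.inr (by simp)
  | case3 c rest cur acc hc hcur ih =>
    intro x hx
    rw [List.isEmpty_iff] at hcur; subst hcur
    rw [PySem.Chars.split₀.go] at hx
    simp only [hc, List.isEmpty_nil, if_pos] at hx
    rcases ih x hx with h | h
    · exact Or.inl h
    · exact Or.inr (by simpa using h.trans (rest.suffix_cons c).isInfix)
  | case4 c rest cur acc hc hcur ih =>
    intro x hx
    rw [PySem.Chars.split₀.go] at hx
    simp only [hc, if_pos, if_neg hcur] at hx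
    rcases ih x hx with h | h
    · simp at h
      rcases h with rfl | h
      · exact Or.inr ((cur.reverse.prefix_append (c :: rest)).isInfix)
      · exact Or.inl h
    · exact Or.inr (h.trans ((rest.suffix_cons c).trans
        (List.suffix_append cur.reverse (c :: rest))).isInfix)
  | case5 c rest cur acc hc ih =>
    intro x hx
    rw [PySem.Chars.split₀.go] at hx
    simp only [if_neg hc] at hx
    rcases ih x hx with h | h
    · exact Or.inl h
    · exact Or.inr (by simpa using h)

theorem pv_mem_split0_infix (s w : List Char) (h : w ∈ PySem.Chars.split₀ s) : w <:+: s := by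
  rcases pv_split0_go_spec s [] [] w (by simpa [PySem.Chars.split₀] using h) with h' | h'
  · simp at h'
  · simpa using h'

theorem pv_split0_all_space :
    ∀ (s : List Char), (∀ c ∈ s, PySem.Chars.isspace c = true) →
      ∀ acc : List (List Char), PySem.Chars.split₀.go s [] acc = acc.reverse := by
  intro s
  induction s with
  | nil => intro _ acc; rw [PySem.Chars.split₀.go]; simp
  | cons c rest ih =>
    intro h acc
    rw [PySem.Chars.split₀.go]
    simp only [h c (by simp), List.isEmpty_nil, if_pos]
    exact ih (fun d hd => h d (by simp [hd])) acc

theorem pv_split0_all_space' (s : List Char) (h : ∀ c ∈ s, PySem.Chars.isspace c = true) :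
    PySem.Chars.split₀ s = [] := by
  rw [PySem.Chars.split₀, pv_split0_all_space s h]; rfl

theorem pv_splitlines_go_spec (isB : Char → Bool) :
    ∀ (l cur : List Char) (acc : List (List Char)) (x : List Char),
      x ∈ PySem.Chars.splitlines.go isB l cur acc → x ∈ acc ∨ x <:+: (cur.reverse ++ l) := by
  intro l cur acc
  induction l, cur, acc using PySem.Chars.splitlines.go.induct (isB := isB) with
  | case1 cur acc h =>
    intro x hx
    rw [PySem.Chars.splitlines.go] at hx
    simp [h] at hx
    exact Or.inl hx
  | case2 cur acc h =>
    intro x hx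
    rw [PySem.Chars.splitlines.go] at hx
    simp [h] at hx
    rcases hx with hx | rfl
    · exact Or.inl hx
    · exact Or.inr (by simp)
  | case3 rest cur acc ih =>
    intro x hx
    rw [PySem.Chars.splitlines.go] at hx
    rcases ih x hx with h | h
    · simp at h
      rcases h with rfl | h
      · exact Or.inr ((cur.reverse.prefix_append _).isInfix)
      · exact Or.inl h
    · exact Or.inr (h.trans (((rest.suffix_cons '\n').trans ((('\n' :: rest).suffix_cons '\x0d').trans
        (List.suffix_append cur.reverse _))).isInfix))
  | case4 c rest cur acc hne hB ih =>
    intro x hx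
    rw [PySem.Chars.splitlines.go] at hx
    · simp only [hB, if_pos] at hx
      rcases ih x hx with h | h
      · simp at h
        rcases h with rfl | h
        · exact Or.inr ((cur.reverse.prefix_append _).isInfix)
        · exact Or.inl h
      · exact Or.inr (h.trans ((rest.suffix_cons c).trans
          (List.suffix_append cur.reverse (c :: rest))).isInfix)
    · exact hne
  | case5 c rest cur acc hne hB ih =>
    intro x hx
    rw [PySem.Chars.splitlines.go] at hx
    · simp only [if_neg hB] at hx
      rcases ih x hx with h | h
      · exact Or.inl h
      · exact Or.inr (by simpa using h)
    · exact hne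

theorem pv_mem_splitlines_infix (s l : List Char) (h : l ∈ PySem.Chars.splitlines s) : l <:+: s := by
  rcases pv_splitlines_go_spec _ s [] [] l (by simpa [PySem.Chars.splitlines] using h) with h' | h'
  · simp at h'
  · simpa using h'

theorem pv_go_sep (t acc' : List Char) (acc : List (List Char)) (f : Nat) :
    PySem.Chars.splitOn.go ['_', '_', '_'] (f + 1) (['_', '_', '_'] ++ t) acc' acc =
      PySem.Chars.splitOn.go ['_', '_', '_'] f t [] (acc'.reverse :: acc) := by
  rw [PySem.Chars.splitOn.go.eq_def]
  have hp : (['_','_','_'] : List Char).isPrefixOf ('_' :: '_' :: '_' :: t) = true := by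
    simp [List.isPrefixOf]
  simp [hp]

theorem pv_go_consume (r : List Char) :
    ∀ (t acc' : List Char) (acc : List (List Char)) (f : Nat),
      (∀ j < r.length, ¬ (['_', '_', '_'] <+: ((r ++ t).drop j))) →
      PySem.Chars.splitOn.go ['_', '_', '_'] (r.length + f) (r ++ t) acc' acc =
        PySem.Chars.splitOn.go ['_', '_', '_'] f t (r.reverse ++ acc') acc := by
  induction r with
  | nil => intro t acc' acc f h; simp
  | cons c r' ih =>
    intro t acc' acc f h
    have hnp : (['_','_','_'] : List Char).isPrefixOf (c :: (r' ++ t)) = false := by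
      rw [Bool.eq_false_iff]
      intro hp
      exact h 0 (by simp) (by simpa using List.isPrefixOf_iff_prefix.mp hp)
    have hlen : (c :: r').length + f = (r'.length + f) + 1 := by simp; omega
    rw [hlen, List.cons_append, PySem.Chars.splitOn.go.eq_def]
    simp only [hnp, Bool.false_eq_true, if_false]
    rw [ih t (c :: acc') acc f (fun j hj => by simpa using h (j+1) (by simp; omega))]
    simp

theorem pv_go_finish (acc' : List Char) (acc : List (List Char)) (f : Nat) :
    PySem.Chars.splitOn.go ['_', '_', '_'] (f + 1) [] acc' acc = (acc'.reverse :: acc).reverse := by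
  rw [PySem.Chars.splitOn.go.eq_def]

theorem pv_go_chunks (rs : List (List Char)) :
    ∀ (f : Nat) (acc : List (List Char)), (∀ r ∈ rs, pvGood r) →
      PySem.Chars.splitOn.go ['_', '_', '_'] ((rs.map (fun r => r.length + 1)).sum + f + 1)
        ((rs.map (fun r => r ++ ['_', '_', '_'])).flatten) [] acc =
      (([] : List Char) :: (rs.reverse ++ acc)).reverse := by
  induction rs with
  | nil => intro f acc _; simpa using pv_go_finish [] acc f
  | cons r rs' ih =>
    intro f acc hgood
    have hfuel : ((r :: rs').map (fun r => r.length + 1)).sum + f + 1 =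
        r.length + (((rs'.map (fun r => r.length + 1)).sum + f + 1) + 1) := by
      simp; omega
    have hflat : (((r :: rs').map (fun r => r ++ ['_','_','_'])).flatten) =
        r ++ (['_','_','_'] ++ ((rs'.map (fun r => r ++ ['_','_','_'])).flatten)) := by
      simp
    rw [hfuel, hflat]
    rw [pv_go_consume r _ [] acc _ (by
      have := pv_good_no_early r (['_','_','_'] ++ ((rs'.map (fun r => r ++ ['_','_','_'])).flatten))
        (hgood r (by simp))
      simpa using this)]
    rw [List.append_nil, pv_go_sep, List.reverse_reverse]
    rw [ih f (r :: acc) (fun r' hr' => hgood r' (by simp [hr']))]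
    simp

theorem pv_splitOn_chunks (rs : List (List Char)) (h : ∀ r ∈ rs, pvGood r) :
    PySem.Chars.splitOn ((rs.map (fun r => r ++ ['_', '_', '_'])).flatten) ['_', '_', '_'] =
      rs ++ [[]] := by
  have hlen : ((rs.map (fun r => r ++ ['_', '_', '_'])).flatten).length + 1 =
      (rs.map (fun r => r.length + 1)).sum + (2 * rs.length) + 1 := by
    induction rs with
    | nil => simp
    | cons r rs' ih => simp_all; omega
  rw [PySem.Chars.splitOn, hlen, pv_go_chunks rs (2 * rs.length) [] h]
  simp

theorem pv_foldA (f5 : List Char) (ws : List (List Char)) :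
    ∀ (off : Int) (out : List Char),
      (ws.foldl (fun (st : Int × List Char) word =>
          (st.1 + (word.length : Int) + 1,
           st.2 ++ word ++ '\t' :: (f5 ++ '@' :: (PySem.Int.toChars st.1 ++ ['_', '_', '_'])))) (off, out)).2 =
        out ++ ((pvRecs f5 ws off).map (fun r => r ++ ['_', '_', '_'])).flatten := by
  induction ws with
  | nil => intro off out; simp [pvRecs]
  | cons w ws' ih =>
    intro off out
    rw [List.foldl_cons, ih]
    simp [pvRecs]

theorem pv_zip_scanl (f5 : List Char) (ws : List (List Char)) :
    ∀ off : Int,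
      ((ws.zip (ws.scanl (fun (a : Int) w => a + (w.length : Int) + 1) off)).map
        (fun wo => wo.1 ++ '\t' :: (f5 ++ '@' :: PySem.Int.toChars wo.2))) = pvRecs f5 ws off := by
  induction ws with
  | nil => intro off; simp [pvRecs]
  | cons w ws' ih =>
    intro off
    rw [List.scanl_cons]
    simp only [List.zip_cons_cons, List.map_cons, pvRecs]
    rw [ih]

theorem pv_recs_mem (f5 : List Char) (ws : List (List Char)) :
    ∀ (off : Int), 0 ≤ off → ∀ r ∈ pvRecs f5 ws off,
      ∃ w o, w ∈ ws ∧ 0 ≤ o ∧ r = w ++ '\t' :: (f5 ++ '@' :: PySem.Int.toChars o) := by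
  induction ws with
  | nil => intro off _ r hr; simp [pvRecs] at hr
  | cons w ws' ih =>
    intro off hoff r hr
    rw [pvRecs] at hr
    rcases List.mem_cons.mp hr with rfl | hr
    · exact ⟨w, off, by simp, hoff, rfl⟩
    · obtain ⟨w', o, hw', ho, rfl⟩ := ih (off + (w.length : Int) + 1) (by positivity) r hr
      exact ⟨w', o, by simp [hw'], ho, rfl⟩

theorem pv_good_record (f5 w : List Char) (o : Int) (ho : 0 ≤ o)
    (hw : ¬ (['_', '_', '_'] <:+: w)) (hf : ¬ (['_', '_', '_'] <:+: f5)) :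
    pvGood (w ++ '\t' :: (f5 ++ '@' :: PySem.Int.toChars o)) := by
  obtain ⟨hne, hall⟩ := pv_toChars_nonneg o ho
  constructor
  · exact pv_no_triple_append w _ '\t' (by decide) hw
      (pv_no_triple_append f5 _ '@' (by decide) hf
        (pv_no_triple_of_no_underscore _ hall))
  · rcases hd : (PySem.Int.toChars o).getLast? with _ | d
    · rw [List.getLast?_eq_none_iff] at hd; exact absurd hd hne
    · refine ⟨d, ?_, hall d (List.mem_of_getLast? hd)⟩
      rw [List.getLast?_append_of_ne_nil _ (by simp)]
      rw [show ('\t' :: (f5 ++ '@' :: PySem.Int.toChars o)) = ['\t'] ++ (f5 ++ '@' :: PySem.Int.toChars o) from rfl]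
      rw [List.getLast?_append_of_ne_nil _ (by simp)]
      rw [List.getLast?_append_of_ne_nil _ (by simp)]
      rw [show ('@' :: PySem.Int.toChars o) = ['@'] ++ PySem.Int.toChars o from rfl]
      rw [List.getLast?_append_of_ne_nil _ hne, hd]

theorem pv_core_eq (f text : List Char)
    (hcond : ¬ (['_', '_', '_'] <:+: text) ∧
      (¬ (['_', '_', '_'] <:+: PySem.Chars.slice f (some ((f.length : Int) - 5)) none) ∨
       ∀ c ∈ text, PySem.Chars.isspace c = true)) :
    fmapperCoreA f text = fmapperCoreB f text := by
  unfold fmapperCoreA fmapperCoreB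
  simp only []
  set f5 := PySem.Chars.slice f (some ((f.length : Int) - 5)) none with hf5
  set ws := (PySem.Chars.splitlines text).flatMap PySem.Chars.split₀ with hws
  have hfold : (PySem.Chars.splitlines text).foldl
      (fun (st : Int × List Char) line =>
        (PySem.Chars.split₀ line).foldl
          (fun (st : Int × List Char) word =>
            (st.1 + (word.length : Int) + 1,
             st.2 ++ word ++ '\t' :: (f5 ++ '@' :: (PySem.Int.toChars st.1 ++ ['_', '_', '_'])))) st)
      ((0 : Int), ([] : List Char)) =
      ws.foldl (fun (st : Int × List Char) word =>
            (st.1 + (word.length : Int) + 1,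
             st.2 ++ word ++ '\t' :: (f5 ++ '@' :: (PySem.Int.toChars st.1 ++ ['_', '_', '_'])))) ((0 : Int), ([] : List Char)) :=
    (List.foldl_flatMap).symm
  rw [hfold, pv_zip_scanl f5 ws 0]
  have hgood : ∀ r ∈ pvRecs f5 ws 0, pvGood r := by
    rcases hcond.2 with htag | hspace
    · intro r hr
      obtain ⟨w, o, hwmem, ho, rfl⟩ := pv_recs_mem f5 ws 0 (le_refl 0) r hr
      obtain ⟨line, hline, hw⟩ := List.mem_flatMap.mp hwmem
      have hwinf : w <:+: text := (pv_mem_split0_infix _ _ hw).trans (pv_mem_splitlines_infix _ _ hline)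
      exact pv_good_record f5 w o ho (fun h3 => hcond.1 (h3.trans hwinf)) htag
    · have : ws = [] := by
        rw [hws, List.flatMap_eq_nil_iff]
        intro line hline
        exact pv_split0_all_space' line
          (fun c hc => hspace c ((pv_mem_splitlines_infix _ _ hline).mem hc))
      rw [this]; intro r hr; simp [pvRecs] at hr
  rw [pv_foldA f5 ws 0 []]
  rw [List.nil_append, pv_splitOn_chunks _ hgood]

-- ===== VERDICT (by name: the statement is the Claim_ definition above) =====
theorem fmapper_spec : Claim_unchanged_fmapper := by
  intro pair _ hnd
  rw [D_fmapper, not_or, not_and_or] at hnd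
  obtain ⟨h1, h2⟩ := hnd
  unfold fmapper fmapper_alt
  rw [pv_core_eq]
  constructor
  · intro h3
    exact h1 (PySem.Str.isIn_iff_infix _ _ |>.mpr (by simpa using h3))
  · rcases h2 with h2 | h2
    · left
      intro h3
      refine h2 (PySem.Str.isIn_iff_infix _ _ |>.mpr ?_)
      rw [PySem.Str.toList_slice]
      simpa [PySem.Str.len] using h3
    · right
      intro c hc
      rw [Bool.not_eq_true, List.any_eq_false] at h2
      have := h2 c hc
      simpa using this

theorem fmapper_changed : Claim_changed_fmapper := by
  unfold Claim_changed_fmapper; decide
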